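-- pv_equiv track=rewrite | github.com/MrBrantCode/unitest_baseline | mut_generate/mist_train_taco/taco_11646/solution.py | count_valid_arrays
-- ===== SOURCE A (Python) =====
-- def count_valid_arrays(n, a):
--     mod = 998244353
--     dp = [0] * (n + 1)
--     dp[0] = 1
--     s = []
--     sm = 0
--
--     for i in range(n):
--         x = a[i]
--         c = dp[i]
--         if i & 1:
--             c = -dp[i]
--
--         while len(s) and s[-1][0] >= x:
--             (v, cc) = s.pop()
--             c += cc
--             c %= mod
--             sm -= v * cc
--             sm %= mod
--
--         s.append((x, c))
--         sm += x * c
--         sm %= mod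
--
--         if i & 1:
--             dp[i + 1] -= sm
--         else:
--             dp[i + 1] += sm
--
--         dp[i + 1] %= mod
--
--     return dp[-1]
-- ===== SOURCE B (Python) =====
-- def count_valid_arrays(n, a):
--     mod = 998244353
--     dp = [1]
--     for i in range(n):
--         total = 0
--         m = 0
--         for j in range(i, -1, -1):
--             m = a[j] if j == i else min(m, a[j])
--             total = (total + m * (dp[j] if j % 2 == 0 else -dp[j])) % mod
--         dp.append(total % mod if i % 2 == 0 else (-total) % mod)
--     return dp[-1]
-- ===== Notes on version B (the rewrite author's own statement) =====
-- stated objective: simpler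
-- what changed: Drops A's monotonic stack and its incremental bookkeeping of sm: B recomputes dp[i+1] = ±Σ_j min(a[j..i])·(±dp[j]) each iteration by a plain descending scan over j with a running minimum.
import Mathlib
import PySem

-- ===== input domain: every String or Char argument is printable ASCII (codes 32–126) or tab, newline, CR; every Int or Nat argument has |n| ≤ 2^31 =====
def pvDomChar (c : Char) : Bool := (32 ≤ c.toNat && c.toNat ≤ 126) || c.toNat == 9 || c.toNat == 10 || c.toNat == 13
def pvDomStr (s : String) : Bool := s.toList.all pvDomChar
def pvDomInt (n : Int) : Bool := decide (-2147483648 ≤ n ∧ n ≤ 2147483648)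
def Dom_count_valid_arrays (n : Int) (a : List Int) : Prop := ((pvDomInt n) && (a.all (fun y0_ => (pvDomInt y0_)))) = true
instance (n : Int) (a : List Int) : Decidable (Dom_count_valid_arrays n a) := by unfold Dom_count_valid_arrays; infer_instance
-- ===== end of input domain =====

-- B replaces A's monotonic-stack maintenance of Σⱼ min(a[j..i])·(±dp[j]) by a naive descending
-- rescan with a running minimum: same values, simpler O(n²) code instead of the stack bookkeeping.

-- ===== PORT A =====
-- the inner 'while len(s) and s[-1][0] >= x' pop loop (stack top first)
def cvaPop (x : Int) : List (Int × Int) → Int → Int → (List (Int × Int)) × Int × Int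
  | [], c, sm => ([], c, sm)
  | (v, cc) :: rest, c, sm =>
    if v ≥ x then
      cvaPop x rest (PySem.Int.mod (c + cc) 998244353) (PySem.Int.mod (sm - v * cc) 998244353)
    else ((v, cc) :: rest, c, sm)

-- one iteration of A's 'for i in range(n)' loop; state = (dp, s, sm)
def cvaBody (a : List Int) (st : List Int × List (Int × Int) × Int) (i : Int) :
    List Int × List (Int × Int) × Int :=
  let dp := st.1
  let s := st.2.1
  let sm := st.2.2
  let x := PySem.List.pyGetD a i 0
  let c := if PySem.Int.band i 1 ≠ 0 then -(PySem.List.pyGetD dp i 0) else PySem.List.pyGetD dp i 0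
  let psc := cvaPop x s c sm
  let c' := psc.2.1
  let sm' := PySem.Int.mod (psc.2.2 + x * c') 998244353
  let d := if PySem.Int.band i 1 ≠ 0 then PySem.List.pyGetD dp (i + 1) 0 - sm'
           else PySem.List.pyGetD dp (i + 1) 0 + sm'
  (dp.set (i + 1).toNat (PySem.Int.mod d 998244353), (x, c') :: psc.1, sm')

def count_valid_arrays (n : Int) (a : List Int) : Int :=
  let res := (PySem.List.pyRange 0 n 1).foldl (cvaBody a)
    ((List.replicate (n + 1).toNat 0).set 0 1, [], 0)
  PySem.List.pyGetD res.1 (-1) 0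

-- ===== PORT B =====
-- one iteration of B's inner 'for j in range(i, -1, -1)' loop; state = (total, m)
def cvaInner (a : List Int) (dp : List Int) (i : Int) (tm : Int × Int) (j : Int) : Int × Int :=
  let m := if j == i then PySem.List.pyGetD a j 0 else min tm.2 (PySem.List.pyGetD a j 0)
  (PySem.Int.mod
      (tm.1 + m * (if PySem.Int.mod j 2 == 0 then PySem.List.pyGetD dp j 0
                   else -(PySem.List.pyGetD dp j 0))) 998244353,
   m)

-- one iteration of B's outer 'for i in range(n)' loop (dp.append(...))
def cvaOuter (a : List Int) (dp : List Int) (i : Int) : List Int :=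
  let tm := (PySem.List.pyRange i (-1) (-1)).foldl (cvaInner a dp i) (0, 0)
  dp ++ [if PySem.Int.mod i 2 == 0 then PySem.Int.mod tm.1 998244353
         else PySem.Int.mod (-tm.1) 998244353]

def count_valid_arrays_alt (n : Int) (a : List Int) : Int :=
  let dp := (PySem.List.pyRange 0 n 1).foldl (cvaOuter a) [1]
  PySem.List.pyGetD dp (-1) 0

-- ===== PRECONDITION & SPEC =====
-- Pre_: A raises IndexError when n < 0 (dp[0] = 1 on an empty dp) or n > len(a) (reading a[i]).
def Pre_count_valid_arrays (n : Int) (a : List Int) : Prop := 0 ≤ n ∧ n ≤ a.length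
instance (n : Int) (a : List Int) : Decidable (Pre_count_valid_arrays n a) := by unfold Pre_count_valid_arrays; infer_instance
def pvWitness_count_valid_arrays : Int × List Int := (3, [2, 1, 2])
def Spec_count_valid_arrays (n : Int) (a : List Int) (out : Int) : Prop := out = count_valid_arrays_alt n a
instance (n : Int) (a : List Int) (out : Int) : Decidable (Spec_count_valid_arrays n a out) := by unfold Spec_count_valid_arrays; infer_instance

-- ===== CLAIM (what is proved, stated in full; the proofs are below) =====
def Claim_equal_count_valid_arrays : Prop := ∀ (n : Int) (a : List Int), Dom_count_valid_arrays n a → Pre_count_valid_arrays n a → Spec_count_valid_arrays n a (count_valid_arrays n a)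

-- ===== LEMMAS AND PROOFS =====

-- The common mathematical reference: dp list of the recurrence
--   dp[0] = 1,  dp[i+1] = (±Σ_{j≤i} min(a[j..i])·(±dp[j])) % 998244353.
def pvSgn (j : Nat) : Int := if j % 2 = 0 then 1 else -1

-- min of a[j..k] (j ≤ k expected)
def pvSegMin (a : List Int) (j k : Nat) : Int :=
  (List.range' (j + 1) (k - j)).foldl (fun acc t => min acc (a.getD t 0)) (a.getD j 0)

def pvDp (a : List Int) : Nat → List Int
  | 0 => [1]
  | i + 1 => pvDp a i ++
      [(pvSgn i * ((List.range (i + 1)).map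
          (fun j => pvSegMin a j i * (pvSgn j * (pvDp a i).getD j 0))).sum) % 998244353]

def pvVal (a : List Int) (i : Nat) : Int := (pvDp a i).getD i 0

def pvG (a : List Int) (j : Nat) : Int := pvSgn j * pvVal a j

def pvS (a : List Int) (i : Nat) : Int :=
  ((List.range (i + 1)).map (fun j => pvSegMin a j i * pvG a j)).sum

theorem length_pvDp (a : List Int) (i : Nat) : (pvDp a i).length = i + 1 := by
  induction i with
  | zero => rfl
  | succ i ih => simp [pvDp, ih]

theorem getD_pvDp (a : List Int) {j i : Nat} (h : j ≤ i) :
    (pvDp a i).getD j 0 = pvVal a j := by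
  induction i with
  | zero => have : j = 0 := by omega
            subst this; rfl
  | succ i ih =>
    rcases Nat.lt_or_ge j (i + 1) with h' | h'
    · show (pvDp a i ++ _).getD j 0 = _
      rw [List.getD_append _ _ _ _ (by rw [length_pvDp]; omega)]
      exact ih (by omega)
    · have hj : j = i + 1 := by omega
      subst hj; rfl

theorem pvDp_succ (a : List Int) (i : Nat) :
    pvDp a (i + 1) = pvDp a i ++ [(pvSgn i * pvS a i) % 998244353] := by
  show pvDp a i ++ _ = _
  congr 3
  unfold pvS
  congr 1
  congr 1
  apply List.map_congr_left
  intro j hj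
  rw [getD_pvDp a (by simp [List.mem_range] at hj; omega)]
  rfl

theorem pvVal_succ (a : List Int) (i : Nat) :
    pvVal a (i + 1) = (pvSgn i * pvS a i) % 998244353 := by
  unfold pvVal
  rw [pvDp_succ, List.getD_eq_getElem?_getD]
  have h : i + 1 = (pvDp a i).length := by rw [length_pvDp]
  rw [h, List.getElem?_concat_length]
  rfl

theorem segMin_self (a : List Int) (k : Nat) : pvSegMin a k k = a.getD k 0 := by
  simp [pvSegMin]

theorem segMin_snoc (a : List Int) {j k : Nat} (h : j ≤ k) :
    pvSegMin a j (k + 1) = min (pvSegMin a j k) (a.getD (k + 1) 0) := by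
  unfold pvSegMin
  have h1 : k + 1 - j = (k - j) + 1 := by omega
  have h2 : List.range' (j + 1) ((k - j) + 1) =
      List.range' (j + 1) (k - j) ++ List.range' (j + 1 + 1 * (k - j)) 1 := by
    rw [List.range'_append]
  have h3 : j + 1 + 1 * (k - j) = k + 1 := by omega
  rw [h1, h2, h3, List.foldl_append]
  rfl

theorem segMin_cons (a : List Int) {j k : Nat} (h : j < k) :
    pvSegMin a j k = min (a.getD j 0) (pvSegMin a (j + 1) k) := by
  unfold pvSegMin
  have h1 : k - j = (k - (j + 1)) + 1 := by omega
  rw [h1, List.range'_succ, List.foldl_cons, ← List.foldl_map (f := fun t => a.getD t 0) (g := min),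
    ← List.foldl_map (f := fun t => a.getD t 0) (g := min), List.foldl_assoc]

theorem segMin_mono (a : List Int) {l j k : Nat} (h1 : l ≤ j) (h2 : j ≤ k) :
    pvSegMin a l k ≤ pvSegMin a j k := by
  induction j with
  | zero => have : l = 0 := by omega
            subst this; exact le_refl _
  | succ j ih =>
    rcases Nat.lt_or_ge l (j + 1) with h' | h'
    · calc pvSegMin a l k ≤ pvSegMin a j k := ih (by omega) (by omega)
        _ ≤ pvSegMin a (j + 1) k := by
            rw [segMin_cons a (show j < k by omega)]; exact min_le_right _ _
    · have : l = j + 1 := by omega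
      subst this; exact le_refl _

-- sum of (±dp[j]) over j = l .. hi
def pvGsum (a : List Int) (l hi : Nat) : Int := ((List.range' l (hi + 1 - l)).map (pvG a)).sum

-- weighted sum of min(a[j..i])·(±dp[j]) over j = l .. hi
def pvW (a : List Int) (i l hi : Nat) : Int :=
  ((List.range' l (hi + 1 - l)).map (fun j => pvSegMin a j i * pvG a j)).sum

theorem rangeSum_split (f : Nat → Int) {l m h : Nat} (h1 : l ≤ m) (h2 : m ≤ h + 1) :
    ((List.range' l (m - l)).map f).sum + ((List.range' m (h + 1 - m)).map f).sum =
      ((List.range' l (h + 1 - l)).map f).sum := by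
  have e : List.range' l (m - l) ++ List.range' m (h + 1 - m) = List.range' l (h + 1 - l) := by
    have e2 := List.range'_append (s := l) (m := m - l) (n := h + 1 - m) (step := 1)
    rw [show l + 1 * (m - l) = m by omega] at e2
    rw [e2, show m - l + (h + 1 - m) = h + 1 - l by omega]
  rw [← e, List.map_append, List.sum_append]

theorem pvGsum_split (a : List Int) {l2 l1 hi : Nat} (h0 : 0 < l1) (h1 : l2 ≤ l1)
    (h2 : l1 ≤ hi + 1) : pvGsum a l2 (l1 - 1) + pvGsum a l1 hi = pvGsum a l2 hi := by
  unfold pvGsum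
  have e := rangeSum_split (pvG a) (l := l2) (m := l1) (h := hi) h1 h2
  rw [show l1 - 1 + 1 - l2 = l1 - l2 by omega]
  exact e

theorem pvW_split (a : List Int) (i : Nat) {l2 l1 hi : Nat} (h0 : 0 < l1) (h1 : l2 ≤ l1)
    (h2 : l1 ≤ hi + 1) : pvW a i l2 (l1 - 1) + pvW a i l1 hi = pvW a i l2 hi := by
  unfold pvW
  have e := rangeSum_split (fun j => pvSegMin a j i * pvG a j) (l := l2) (m := l1) (h := hi) h1 h2
  rw [show l1 - 1 + 1 - l2 = l1 - l2 by omega]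
  exact e

theorem pvGsum_self (a : List Int) (k : Nat) : pvGsum a k k = pvG a k := by
  unfold pvGsum
  rw [show k + 1 - k = 1 by omega, List.range'_one]
  simp

theorem pvW_self (a : List Int) (i k : Nat) : pvW a i k k = pvSegMin a k i * pvG a k := by
  unfold pvW
  rw [show k + 1 - k = 1 by omega, List.range'_one]
  simp

theorem pvGsum_none (a : List Int) (k : Nat) : pvGsum a (k + 1) k = 0 := by
  unfold pvGsum
  rw [show k + 1 - (k + 1) = 0 by omega]
  rfl

theorem pvW_none (a : List Int) (i k : Nat) : pvW a i (k + 1) k = 0 := by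
  unfold pvW
  rw [show k + 1 - (k + 1) = 0 by omega]
  rfl

theorem pvS_eq_pvW (a : List Int) (i : Nat) : pvS a i = pvW a i 0 i := by
  unfold pvS pvW
  rw [List.range_eq_range']
  rfl

-- the block minimum is constant over a block: v·Σc ≡ Σ min·c
theorem block_w (a : List Int) {i l hi : Nat} (hl : l ≤ hi) (hhi : hi ≤ i)
    (h1 : pvSegMin a l i = pvSegMin a hi i) :
    pvSegMin a l i * pvGsum a l hi = pvW a i l hi := by
  unfold pvGsum pvW
  rw [← List.sum_map_mul_left]
  congr 1
  apply List.map_congr_left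
  intro j hj
  have hj' := List.mem_range'_1.mp hj
  have e : pvSegMin a j i = pvSegMin a l i :=
    le_antisymm (by rw [h1]; exact segMin_mono a (by omega) hhi)
      (segMin_mono a (by omega) (by omega))
  simp only [e]

theorem pvmod_modEq (x : Int) : Int.ModEq 998244353 (x % 998244353) x :=
  Int.emod_emod_of_dvd x dvd_rfl

-- A's stack invariant: s (top first) covers indices 0..hi at step i; each entry (v,c) covers a
-- block [l..hi'], v is the min of a[l..i] (constant over the block), c ≡ Σ_block ±dp[j] (mod M),
-- and values strictly decrease towards the bottom.
def pvStk (a : List Int) (i : Nat) : List (Int × Int) → Nat → Prop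
  | [], _ => False
  | (v, c) :: rest, hi =>
    ∃ l : Nat, l ≤ hi ∧ v = pvSegMin a l i ∧ v = pvSegMin a hi i ∧
      Int.ModEq 998244353 c (pvGsum a l hi) ∧
      (match rest with
       | [] => l = 0
       | (v', _) :: _ => 0 < l ∧ v' < v ∧ pvStk a i rest (l - 1))

theorem pop_spec (a : List Int) (i' : Nat) (x : Int) :
    ∀ (s : List (Int × Int)) (hi : Nat) (c sm : Int), pvStk a i' s hi → hi ≤ i' →
    ∃ l : Nat, l ≤ hi + 1 ∧
      Int.ModEq 998244353 (cvaPop x s c sm).2.1 (c + pvGsum a l hi) ∧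
      Int.ModEq 998244353 (cvaPop x s c sm).2.2 (sm - pvW a i' l hi) ∧
      (∀ j, l ≤ j → j ≤ hi → x ≤ pvSegMin a j i') ∧
      ((cvaPop x s c sm).1 = [] ∧ l = 0 ∨
        (∃ v' c'' rest, (cvaPop x s c sm).1 = (v', c'') :: rest ∧ v' < x ∧ 0 < l ∧
          v' = pvSegMin a (l - 1) i' ∧ pvStk a i' ((v', c'') :: rest) (l - 1))) := by
  intro s
  induction s with
  | nil => intro hi c sm hstk; exact absurd hstk (by simp [pvStk])
  | cons vc rest ih =>
    obtain ⟨v, cc⟩ := vc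
    intro hi c sm hstk hhi
    obtain ⟨l1, hl1, hv1, hv2, hcc, hrest⟩ := hstk
    by_cases hvx : v ≥ x
    · have hstep : cvaPop x ((v, cc) :: rest) c sm =
          cvaPop x rest ((c + cc) % 998244353) ((sm - v * cc) % 998244353) := by
        simp [cvaPop, hvx]
      have hblock : v * pvGsum a l1 hi = pvW a i' l1 hi := by
        rw [hv1]; exact block_w a hl1 hhi (hv1 ▸ hv2 ▸ rfl)
      have hxle : ∀ j, l1 ≤ j → j ≤ hi → x ≤ pvSegMin a j i' := by
        intro j hj1 hj2
        calc x ≤ v := hvx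
          _ ≤ pvSegMin a j i' := by rw [hv1]; exact segMin_mono a hj1 (by omega)
      match rest, hrest with
      | [], hl0 =>
        subst hl0
        rw [hstep]
        refine ⟨0, by omega, ?_, ?_, hxle, Or.inl ⟨rfl, rfl⟩⟩
        · exact (pvmod_modEq _).trans ((Int.ModEq.refl c).add hcc)
        · refine (pvmod_modEq _).trans ((Int.ModEq.refl sm).sub ?_)
          exact ((Int.ModEq.refl v).mul hcc).trans (by rw [hblock])
      | (v', cc') :: rest', hr =>
        obtain ⟨hl1pos, hvv, hstk'⟩ := hr
        obtain ⟨l2, hl2, ihc, ihsm, ihxle, ihdisj⟩ :=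
          ih (l1 - 1) ((c + cc) % 998244353) ((sm - v * cc) % 998244353) hstk' (by omega)
        rw [hstep]
        refine ⟨l2, by omega, ?_, ?_, ?_, ?_⟩
        · refine ihc.trans ?_
          have h1 : Int.ModEq 998244353 ((c + cc) % 998244353 + pvGsum a l2 (l1 - 1))
              (c + (pvGsum a l2 (l1 - 1) + cc)) :=
            ((pvmod_modEq _).add (Int.ModEq.refl _)).trans (by rw [show c + cc + pvGsum a l2 (l1 - 1) = c + (pvGsum a l2 (l1 - 1) + cc) by ring])
          refine h1.trans ((Int.ModEq.refl c).add ?_)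
          refine ((Int.ModEq.refl _).add hcc).trans ?_
          rw [pvGsum_split a hl1pos (by omega) (by omega)]
        · refine ihsm.trans ?_
          have h1 : Int.ModEq 998244353 ((sm - v * cc) % 998244353 - pvW a i' l2 (l1 - 1))
              (sm - (pvW a i' l2 (l1 - 1) + v * cc)) :=
            ((pvmod_modEq _).sub (Int.ModEq.refl _)).trans (by rw [show sm - v * cc - pvW a i' l2 (l1 - 1) = sm - (pvW a i' l2 (l1 - 1) + v * cc) by ring])
          refine h1.trans ((Int.ModEq.refl sm).sub ?_)
          refine ((Int.ModEq.refl _).add (((Int.ModEq.refl v).mul hcc).trans (by rw [hblock]))).trans ?_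
          rw [pvW_split a i' hl1pos (by omega) (by omega)]
        · intro j hj1 hj2
          rcases Nat.lt_or_ge j l1 with h' | h'
          · exact ihxle j hj1 (by omega)
          · exact hxle j h' hj2
        · exact ihdisj
    · replace hvx : v < x := lt_of_not_ge hvx
      have hstep : cvaPop x ((v, cc) :: rest) c sm = ((v, cc) :: rest, c, sm) := by
        simp [cvaPop, not_le.mpr hvx]
      rw [hstep]
      refine ⟨hi + 1, le_refl _, ?_, ?_, by intro j h1 h2; omega, Or.inr ?_⟩
      · rw [pvGsum_none, add_zero]
      · rw [pvW_none, sub_zero]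
      · exact ⟨v, cc, rest, rfl, hvx, by omega, by simpa using hv2,
          by simpa using ⟨l1, hl1, hv1, hv2, hcc, hrest⟩⟩

theorem stk_lift (a : List Int) (i' : Nat) (x : Int) :
    ∀ (s : List (Int × Int)) (hi : Nat), pvStk a i' s hi → hi ≤ i' →
    pvSegMin a hi i' < x → x = a.getD (i' + 1) 0 → pvStk a (i' + 1) s hi := by
  intro s
  induction s with
  | nil => intro hi h; exact absurd h (by simp [pvStk])
  | cons vc rest ih =>
    obtain ⟨v, cc⟩ := vc
    intro hi hstk hhi hlt hx
    obtain ⟨l, hl, hv1, hv2, hcc, hrest⟩ := hstk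
    have hsm : ∀ j, j ≤ hi → pvSegMin a j (i' + 1) = pvSegMin a j i' := by
      intro j hj
      rw [segMin_snoc a (by omega), ← hx]
      exact min_eq_left (le_of_lt (lt_of_le_of_lt (segMin_mono a hj hhi) hlt))
    refine ⟨l, hl, ?_, ?_, hcc, ?_⟩
    · rw [hsm l hl]; exact hv1
    · rw [hsm hi (le_refl _)]; exact hv2
    · match rest, hrest with
      | [], hl0 => exact hl0
      | (v', cc') :: rest', hr =>
        obtain ⟨hlpos, hvv, hstk'⟩ := hr
        refine ⟨hlpos, hvv, ih (l - 1) hstk' (by omega) ?_ hx⟩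
        exact lt_of_le_of_lt (segMin_mono a (by omega) (by omega)) hlt

-- dp array of A after i iterations (length N+1)
def pvDpArr (a : List Int) (N i : Nat) : List Int :=
  (List.range (N + 1)).map (fun k => if k ≤ i then pvVal a k else 0)

theorem dpArr_getD (a : List Int) (N i k : Nat) (hk : k ≤ N) :
    (pvDpArr a N i).getD k 0 = if k ≤ i then pvVal a k else 0 := by
  unfold pvDpArr
  rw [PySem.List.getD_map_range _ _ _ _ (by omega)]

theorem dpArr_set (a : List Int) (N i : Nat) (_h : i + 1 ≤ N) :
    (pvDpArr a N i).set (i + 1) (pvVal a (i + 1)) = pvDpArr a N (i + 1) := by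
  apply List.ext_getElem
  · simp [pvDpArr]
  · intro k h1 h2
    rw [List.getElem_set]
    simp only [pvDpArr, List.getElem_map, List.getElem_range]
    by_cases hk : i + 1 = k
    · subst hk
      rw [if_pos rfl, if_pos (by omega)]
    · rw [if_neg hk]
      by_cases h3 : k ≤ i
      · rw [if_pos h3, if_pos (by omega)]
      · rw [if_neg h3, if_neg (by omega)]

theorem pvmod_idem (x : Int) : x % 998244353 % 998244353 = x % 998244353 :=
  Int.emod_emod_of_dvd x dvd_rfl

theorem pvmod_neg (x : Int) :
    (-(x % 998244353)) % 998244353 = (-x) % 998244353 := (pvmod_modEq x).neg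

theorem pvW_stable (a : List Int) (i lo hi : Nat)
    (hs : ∀ j, lo ≤ j → j ≤ hi → pvSegMin a j (i + 1) = pvSegMin a j i) :
    pvW a (i + 1) lo hi = pvW a i lo hi := by
  unfold pvW
  congr 1
  apply List.map_congr_left
  intro j hj
  have hj' := List.mem_range'_1.mp hj
  rw [hs j (by omega) (by omega)]

theorem A_step (a : List Int) (N i : Nat) (hiN : i < N)
    (s : List (Int × Int)) (sm : Int)
    (h0 : i = 0 → s = [] ∧ sm = 0)
    (h1 : ∀ i'', i = i'' + 1 → pvStk a i'' s i'' ∧ sm = pvS a i'' % 998244353) :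
    ∃ s' sm', cvaBody a (pvDpArr a N i, s, sm) (i : Int) = (pvDpArr a N (i + 1), s', sm') ∧
      pvStk a i s' i ∧ sm' = pvS a i % 998244353 := by
  have hM : (0 : Int) < 998244353 := by norm_num
  have hband' : (PySem.Int.band (i : Int) 1 ≠ 0) ↔ i % 2 = 1 := by
    rw [show (1 : Int) = ((1 : Nat) : Int) from rfl, PySem.Int.band_natCast, Nat.and_one_is_mod]
    simp only [ne_eq, Int.natCast_eq_zero]
    omega
  have hxeq : PySem.List.pyGetD a (i : Int) 0 = a.getD i 0 := PySem.List.pyGetD_natCast a i 0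
  have hc : (if PySem.Int.band (i : Int) 1 ≠ 0 then -(PySem.List.pyGetD (pvDpArr a N i) (i : Int) 0)
      else PySem.List.pyGetD (pvDpArr a N i) (i : Int) 0) = pvG a i := by
    rw [PySem.List.pyGetD_natCast, dpArr_getD a N i i (by omega), if_pos (le_refl i)]
    by_cases h : i % 2 = 1
    · rw [if_pos (hband'.mpr h), pvG, pvSgn, if_neg (by omega), neg_one_mul]
    · rw [if_neg (fun hh => h (hband'.mp hh)), pvG, pvSgn, if_pos (by omega), one_mul]
  have hd : ∀ sm'' : Int, sm'' = pvS a i % 998244353 →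
      (if PySem.Int.band (i : Int) 1 ≠ 0 then
        PySem.List.pyGetD (pvDpArr a N i) ((i : Int) + 1) 0 - sm''
        else PySem.List.pyGetD (pvDpArr a N i) ((i : Int) + 1) 0 + sm'') % 998244353 =
      pvVal a (i + 1) := by
    intro sm'' h
    have hz : PySem.List.pyGetD (pvDpArr a N i) ((i : Int) + 1) 0 = 0 := by
      rw [show ((i : Int) + 1) = ((i + 1 : Nat) : Int) by push_cast; ring,
        PySem.List.pyGetD_natCast, dpArr_getD a N i (i + 1) (by omega), if_neg (by omega)]
    rw [hz, pvVal_succ]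
    by_cases hpar : i % 2 = 1
    · rw [if_pos (hband'.mpr hpar), zero_sub, h, pvmod_neg, pvSgn, if_neg (by omega), neg_one_mul]
    · rw [if_neg (fun hh => hpar (hband'.mp hh)), zero_add, h, pvmod_idem, pvSgn,
        if_pos (by omega), one_mul]
  have htn : ((i : Int) + 1).toNat = i + 1 := by omega
  -- the pop phase
  rcases Nat.eq_zero_or_pos i with hi0 | hipos
  · -- first iteration: empty stack
    subst hi0
    obtain ⟨hs0, hsm0⟩ := h0 rfl
    subst hs0; subst hsm0
    refine ⟨[(a.getD 0 0, pvG a 0)], (0 + a.getD 0 0 * pvG a 0) % 998244353, ?_, ?_, ?_⟩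
    · unfold cvaBody
      dsimp only
      simp only [PySem.Int.mod_eq_emod_of_pos hM]
      rw [hxeq, hc]
      simp only [cvaPop]
      refine congrArg₂ Prod.mk ?_ rfl
      rw [htn, hd _ ?_, dpArr_set a N 0 (by omega)]
      rw [zero_add, pvS_eq_pvW, pvW_self, segMin_self]
    · exact ⟨0, le_refl 0, (segMin_self a 0).symm, (segMin_self a 0).symm,
        by rw [pvGsum_self], rfl⟩
    · rw [zero_add, pvS_eq_pvW, pvW_self, segMin_self]
  · obtain ⟨i'', rfl⟩ : ∃ i'', i = i'' + 1 := ⟨i - 1, by omega⟩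
    obtain ⟨hstk, hsm⟩ := h1 i'' rfl
    set x := a.getD (i'' + 1) 0 with hxdef
    obtain ⟨l, hl, hpc, hpsm, hxle, hdisj⟩ :=
      pop_spec a i'' x s (i'') (pvG a (i'' + 1)) sm hstk (le_refl _)
    set psc := cvaPop x s (pvG a (i'' + 1)) sm with hpsc
    have hxli : x = pvSegMin a l (i'' + 1) := by
      rcases Nat.lt_or_ge l (i'' + 1) with h' | h'
      · rw [segMin_snoc a (by omega : l ≤ i''), ← hxdef]
        exact (min_eq_right (hxle l (le_refl _) (by omega))).symm
      · have : l = i'' + 1 := by omega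
        subst this
        rw [segMin_self]
    have hxii : x = pvSegMin a (i'' + 1) (i'' + 1) := by rw [segMin_self]
    have hcG : Int.ModEq 998244353 psc.2.1 (pvGsum a l (i'' + 1)) := by
      refine hpc.trans ?_
      have hsplit : pvGsum a l i'' + pvG a (i'' + 1) = pvGsum a l (i'' + 1) := by
        have hs2 := pvGsum_split a (l2 := l) (l1 := i'' + 1) (hi := i'' + 1) (h0 := by omega) (h1 := by omega) (h2 := by omega)
        rw [pvGsum_self] at hs2
        simpa using hs2
      rw [show pvG a (i'' + 1) + pvGsum a l i'' = pvGsum a l i'' + pvG a (i'' + 1) by ring, hsplit]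
    have hstk' : pvStk a (i'' + 1) ((x, psc.2.1) :: psc.1) (i'' + 1) := by
      refine ⟨l, by omega, hxli, hxii, hcG, ?_⟩
      rcases hdisj with ⟨hnil, hl0⟩ | ⟨v', c'', rest, hcons, hvx, hlpos, hv'', hstk2⟩
      · rw [hnil]; exact hl0
      · rw [hcons]
        refine ⟨hlpos, hvx, ?_⟩
        rw [← hcons]
        exact stk_lift a i'' x psc.1 (l - 1) (hcons ▸ hstk2) (by omega)
          (by rw [← hv'']; exact hvx) hxdef
    have hsm' : (psc.2.2 + x * psc.2.1) % 998244353 = pvS a (i'' + 1) % 998244353 := by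
      have hxc : Int.ModEq 998244353 (x * psc.2.1) (pvW a (i'' + 1) l (i'' + 1)) := by
        refine ((Int.ModEq.refl x).mul hcG).trans ?_
        rw [hxli]
        rw [block_w a (by omega) (le_refl _) (by rw [← hxli, ← hxii])]
      have hrest : Int.ModEq 998244353 psc.2.2 (pvS a (i'' + 1) - pvW a (i'' + 1) l (i'' + 1)) := by
        refine hpsm.trans ?_
        have hsmE : Int.ModEq 998244353 sm (pvS a i'') := by rw [hsm]; exact pvmod_modEq _
        refine (hsmE.sub (Int.ModEq.refl _)).trans ?_
        rcases Nat.eq_zero_or_pos l with hl0 | hlpos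
        · subst hl0
          rw [pvS_eq_pvW, sub_self, pvS_eq_pvW, sub_self]
        · have e1 : pvS a i'' - pvW a i'' l i'' = pvW a i'' 0 (l - 1) := by
            rw [pvS_eq_pvW, ← pvW_split a i'' (l2 := 0) (l1 := l) (hi := i'') (h0 := hlpos) (h1 := by omega) (h2 := by omega)]
            ring
          have e2 : pvS a (i'' + 1) - pvW a (i'' + 1) l (i'' + 1) = pvW a (i'' + 1) 0 (l - 1) := by
            rw [pvS_eq_pvW, ← pvW_split a (i'' + 1) (l2 := 0) (l1 := l) (hi := i'' + 1) (h0 := hlpos) (h1 := by omega) (h2 := by omega)]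
            ring
          have hv'lt : pvSegMin a (l - 1) i'' < x := by
            rcases hdisj with ⟨hnil, hl0⟩ | ⟨v', c'', rest, hcons, hvx, _, hv'', _⟩
            · omega
            · rw [← hv'']; exact hvx
          have e3 : pvW a (i'' + 1) 0 (l - 1) = pvW a i'' 0 (l - 1) := by
            apply pvW_stable
            intro j hj1 hj2
            rw [segMin_snoc a (by omega), ← hxdef]
            exact min_eq_left (le_of_lt (lt_of_le_of_lt
              (segMin_mono a (by omega) (by omega)) hv'lt))
          rw [e1, e2, e3]
      have : Int.ModEq 998244353 (psc.2.2 + x * psc.2.1) (pvS a (i'' + 1)) := by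
        refine (hrest.add hxc).trans ?_
        rw [sub_add_cancel]
      exact this
    refine ⟨(x, psc.2.1) :: psc.1, (psc.2.2 + x * psc.2.1) % 998244353, ?_, hstk', hsm'⟩
    unfold cvaBody
    dsimp only
    simp only [PySem.Int.mod_eq_emod_of_pos hM]
    rw [hxeq, hc]
    refine congrArg₂ Prod.mk ?_ rfl
    rw [htn, hd _ hsm', dpArr_set a N (i'' + 1) (by omega)]

theorem A_loop (a : List Int) (N : Nat) :
    ∀ i, i ≤ N → ∃ s sm,
      (List.range i).foldl (fun (st : List Int × List (Int × Int) × Int) (k : Nat) =>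
        cvaBody a st (k : Int)) (pvDpArr a N 0, [], 0) = (pvDpArr a N i, s, sm) ∧
      (i = 0 → s = [] ∧ sm = 0) ∧
      (∀ i'', i = i'' + 1 → pvStk a i'' s i'' ∧ sm = pvS a i'' % 998244353) := by
  intro i
  induction i with
  | zero =>
    intro _
    exact ⟨[], 0, rfl, fun _ => ⟨rfl, rfl⟩, fun i'' h => absurd h (by omega)⟩
  | succ i ih =>
    intro hle
    obtain ⟨s, sm, heq, h0, h1⟩ := ih (by omega)
    obtain ⟨s', sm', hstep, hstk, hsm⟩ := A_step a N i (by omega) s sm h0 h1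
    refine ⟨s', sm', ?_, fun h => absurd h (by omega), ?_⟩
    · rw [List.range_succ, List.foldl_append, heq]
      simp only [List.foldl_cons, List.foldl_nil]
      exact hstep
    · intro i'' h
      have : i'' = i := by omega
      subst this
      exact ⟨hstk, hsm⟩

theorem A_result (a : List Int) (N : Nat) :
    count_valid_arrays (N : Int) a = pvVal a N := by
  unfold count_valid_arrays
  rw [PySem.List.pyRange_zero_natCast, List.foldl_map]
  have hinit : (List.replicate (((N : Int) + 1)).toNat (0 : Int)).set 0 1 = pvDpArr a N 0 := by
    have htn : ((N : Int) + 1).toNat = N + 1 := by omega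
    rw [htn]
    apply List.ext_getElem
    · simp [pvDpArr]
    · intro k h1 h2
      rw [List.getElem_set]
      simp only [pvDpArr, List.getElem_map, List.getElem_range, List.getElem_replicate]
      by_cases hk : 0 = k
      · have hk' : k = 0 := hk.symm
        subst hk'
        rw [if_pos rfl, if_pos (by omega)]
        rfl
      · rw [if_neg hk, if_neg (by omega)]
  rw [hinit]
  obtain ⟨s, sm, heq, _, _⟩ := A_loop a N N (le_refl N)
  rw [heq]
  show PySem.List.pyGetD (pvDpArr a N N) (-1) 0 = pvVal a N
  unfold pvDpArr
  rw [List.range_succ, List.map_append]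
  simp only [List.map_cons, List.map_nil]
  rw [PySem.List.pyGetD_neg_one_append_singleton, if_pos (le_refl N)]

theorem term_eq (a dp : List Int) (i : Nat) (hdp : ∀ j, j ≤ i → dp.getD j 0 = pvVal a j)
    (j : Nat) (hj : j ≤ i) :
    (if PySem.Int.mod (j : Int) 2 == 0 then dp.getD j 0 else -(dp.getD j 0)) = pvG a j := by
  rw [hdp j hj,
    show (2 : Int) = ((2 : Nat) : Int) from rfl, PySem.Int.mod_natCast]
  by_cases h : j % 2 = 0
  · simp [h, pvG, pvSgn]
  · have h1 : j % 2 = 1 := by omega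
    simp [h1, pvG, pvSgn]

theorem B_inner (a dp : List Int) (i : Nat)
    (hdp : ∀ j, j ≤ i → dp.getD j 0 = pvVal a j) :
    ∀ k, k < i → ∀ t m, m = pvSegMin a (k + 1) i →
      (PySem.List.pyRange (k : Int) (-1) (-1)).foldl (cvaInner a dp (i : Int)) (t, m) =
        ((t + pvW a i 0 k) % 998244353, pvSegMin a 0 i) := by
  intro k
  induction k with
  | zero =>
    intro hk t m hm
    rw [PySem.List.pyRange_neg_one_cons (by norm_num), PySem.List.pyRange_neg_one_eq_nil (by norm_num)]
    simp only [List.foldl_cons, List.foldl_nil]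
    unfold cvaInner
    have hne : (((0 : Nat) : Int) == (i : Int)) = false := by
      simp only [beq_eq_false_iff_ne, ne_eq, Int.natCast_inj]; omega
    simp only [hne, Bool.false_eq_true, if_false, PySem.List.pyGetD_natCast]
    rw [term_eq a dp i hdp 0 (by omega), hm]
    have hmin : min (pvSegMin a (0 + 1) i) (a.getD 0 0) = pvSegMin a 0 i := by
      rw [segMin_cons a (by omega : 0 < i), min_comm]
    rw [hmin, pvW_self, PySem.Int.mod_eq_emod_of_pos (by norm_num : (0:Int) < 998244353)]
  | succ k ihk =>
    intro hk t m hm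
    rw [PySem.List.pyRange_neg_one_cons (by omega : (-1 : Int) < ((k + 1 : Nat) : Int))]
    simp only [List.foldl_cons]
    have hcast : ((k + 1 : Nat) : Int) - 1 = ((k : Nat) : Int) := by push_cast; ring
    rw [hcast]
    have hne : (((k + 1 : Nat) : Int) == (i : Int)) = false := by
      simp only [beq_eq_false_iff_ne, ne_eq, Int.natCast_inj]; omega
    have hbody : cvaInner a dp (i : Int) (t, m) ((k + 1 : Nat) : Int) =
        ((t + pvSegMin a (k + 1) i * pvG a (k + 1)) % 998244353, pvSegMin a (k + 1) i) := by
      unfold cvaInner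
      simp only [hne, Bool.false_eq_true, if_false, PySem.List.pyGetD_natCast]
      rw [term_eq a dp i hdp (k + 1) (by omega), hm,
        PySem.Int.mod_eq_emod_of_pos (by norm_num : (0:Int) < 998244353)]
      have hmin : min (pvSegMin a (k + 1 + 1) i) (a.getD (k + 1) 0) = pvSegMin a (k + 1) i := by
        rw [segMin_cons a (by omega : k + 1 < i), min_comm]
      rw [hmin]
    rw [hbody, ihk (by omega) _ _ rfl]
    have hW : pvW a i 0 k + pvSegMin a (k + 1) i * pvG a (k + 1) = pvW a i 0 (k + 1) := by
      rw [← pvW_self a i (k + 1)]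
      have hs := pvW_split a i (l2 := 0) (l1 := k + 1) (hi := k + 1) (h0 := by omega) (h1 := by omega) (h2 := by omega)
      simpa using hs
    rw [Int.emod_add_emod, (show t + pvSegMin a (k + 1) i * pvG a (k + 1) + pvW a i 0 k =
      t + (pvW a i 0 k + pvSegMin a (k + 1) i * pvG a (k + 1)) by ring), hW]

theorem B_outer (a : List Int) (i : Nat) :
    cvaOuter a (pvDp a i) (i : Int) = pvDp a (i + 1) := by
  have hdp : ∀ j, j ≤ i → (pvDp a i).getD j 0 = pvVal a j := fun j hj => getD_pvDp a hj
  have hM : (0 : Int) < 998244353 := by norm_num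
  unfold cvaOuter
  rw [PySem.List.pyRange_neg_one_cons (by omega : (-1 : Int) < (i : Int))]
  simp only [List.foldl_cons]
  have hbody : cvaInner a (pvDp a i) (i : Int) (0, 0) (i : Int) =
      ((0 + pvSegMin a i i * pvG a i) % 998244353, pvSegMin a i i) := by
    unfold cvaInner
    simp only [beq_self_eq_true, if_true, PySem.List.pyGetD_natCast]
    rw [term_eq a (pvDp a i) i hdp i (le_refl i), segMin_self,
      PySem.Int.mod_eq_emod_of_pos hM]
  rw [hbody]
  have hsum : ∀ tm1 : Int, tm1 = pvS a i % 998244353 →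
      (pvDp a i ++ [if PySem.Int.mod (i : Int) 2 == 0 then PySem.Int.mod tm1 998244353
        else PySem.Int.mod (-tm1) 998244353]) = pvDp a (i + 1) := by
    intro tm1 htm
    rw [pvDp_succ, PySem.Int.mod_eq_emod_of_pos hM, PySem.Int.mod_eq_emod_of_pos hM,
      show (2 : Int) = ((2 : Nat) : Int) from rfl, PySem.Int.mod_natCast]
    congr 1
    by_cases h : i % 2 = 0
    · simp only [h, Nat.cast_zero, beq_self_eq_true, if_true, htm]
      rw [Int.emod_emod_of_dvd _ dvd_rfl, pvSgn, if_pos h, one_mul]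
    · have h1 : i % 2 = 1 := by omega
      simp only [h1, Nat.cast_one, show ((1 : Int) == 0) = false by decide,
        Bool.false_eq_true, if_false, htm]
      rw [show (-(pvS a i % 998244353)) % 998244353 = (-pvS a i) % 998244353 from
        (pvmod_modEq (pvS a i)).neg, pvSgn, if_neg h, neg_one_mul]
  rcases Nat.eq_zero_or_pos i with hi0 | hipos
  · subst hi0
    rw [show ((0 : Nat) : Int) - 1 = (-1 : Int) by norm_num,
      PySem.List.pyRange_neg_one_eq_nil (le_refl _)]
    simp only [List.foldl_nil]
    exact hsum _ (by rw [zero_add, pvS_eq_pvW, pvW_self, segMin_self])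
  · have hcast : ((i : Nat) : Int) - 1 = ((i - 1 : Nat) : Int) := by push_cast [hipos]; ring
    rw [hcast, B_inner a (pvDp a i) i hdp (i - 1) (by omega) _ _
      (by rw [show i - 1 + 1 = i by omega])]
    apply hsum
    rw [Int.emod_add_emod, zero_add]
    have hW : pvSegMin a i i * pvG a i + pvW a i 0 (i - 1) = pvW a i 0 i := by
      rw [← pvW_self a i i, add_comm]
      have hs := pvW_split a i (l2 := 0) (l1 := i) (hi := i) (h0 := by omega) (h1 := by omega) (h2 := by omega)
      simpa using hs
    rw [hW, ← pvS_eq_pvW]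

theorem B_loop (a : List Int) :
    ∀ N, (List.range N).foldl (fun (dp : List Int) (k : Nat) => cvaOuter a dp (k : Int)) [1] =
      pvDp a N := by
  intro N
  induction N with
  | zero => rfl
  | succ N ih =>
    rw [List.range_succ, List.foldl_append, ih]
    simp only [List.foldl_cons, List.foldl_nil]
    exact B_outer a N

theorem B_result (a : List Int) (N : Nat) :
    count_valid_arrays_alt (N : Int) a = pvVal a N := by
  unfold count_valid_arrays_alt
  rw [PySem.List.pyRange_zero_natCast, List.foldl_map, B_loop]
  cases N with
  | zero => rfl
  | succ i => rw [pvDp_succ, PySem.List.pyGetD_neg_one_append_singleton, ← pvVal_succ]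

-- ===== VERDICT (by name: the statement is the Claim_ definition above) =====
theorem count_valid_arrays_spec : Claim_equal_count_valid_arrays := by
  intro n a _ hpre
  obtain ⟨hn, hlen⟩ := hpre
  unfold Spec_count_valid_arrays
  obtain ⟨N, rfl⟩ : ∃ N : Nat, n = (N : Int) := ⟨n.toNat, (Int.toNat_of_nonneg hn).symm⟩
  rw [A_result a N, B_result a N]
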